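-- pv_equiv track=rewrite | github.com/CodingMateMoon/algorithm-python | sliding-window/Minimum Size Subarray Sum.py | minSubArrayLen_1
-- ===== SOURCE A (Python) =====
-- from typing import List
--
-- def minSubArrayLen_1(target: int, nums: List[int]) -> int:
--
--     sum = left = length = 0
--     # sorted_list = sorted(nums, reverse=True)
--     nums.sort(reverse=True)
--
--     for i in range(len(nums)):
--         if sum < target:
--             sum += nums[i]
--             length += 1
--             continue
--         elif target <= sum:
--             return length
--
--     if sum < target:
--         return 0
--     else:
--         return length
-- ===== SOURCE B (Python) =====
-- # Same in-place reverse sort as A; then a prefix-sum table + bisect instead of a conditional-accumulation scan.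
-- from bisect import bisect_left
-- from itertools import accumulate
-- from typing import List
--
-- def minSubArrayLen_1(target: int, nums: List[int]) -> int:
--     nums.sort(reverse=True)
--     if target <= 0:
--         return 0
--     pre = list(accumulate(nums))
--     # prefix sums are nondecreasing while elements are >= 0; past that they only shrink
--     p = sum(1 for x in nums if x >= 0)
--     i = bisect_left(pre, target, 0, p)
--     return i + 1 if i < p else 0
-- ===== Notes on version B (the rewrite author's own statement) =====
-- stated objective: alternative
-- what changed: Replaces A's element-by-element conditional accumulation loop with building the full prefix-sum table once (itertools.accumulate) and binary-searching it (bisect_left, bounded to the nondecreasing region given by the count of nonnegative elements) for the first prefix sum reaching target.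
import Mathlib
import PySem

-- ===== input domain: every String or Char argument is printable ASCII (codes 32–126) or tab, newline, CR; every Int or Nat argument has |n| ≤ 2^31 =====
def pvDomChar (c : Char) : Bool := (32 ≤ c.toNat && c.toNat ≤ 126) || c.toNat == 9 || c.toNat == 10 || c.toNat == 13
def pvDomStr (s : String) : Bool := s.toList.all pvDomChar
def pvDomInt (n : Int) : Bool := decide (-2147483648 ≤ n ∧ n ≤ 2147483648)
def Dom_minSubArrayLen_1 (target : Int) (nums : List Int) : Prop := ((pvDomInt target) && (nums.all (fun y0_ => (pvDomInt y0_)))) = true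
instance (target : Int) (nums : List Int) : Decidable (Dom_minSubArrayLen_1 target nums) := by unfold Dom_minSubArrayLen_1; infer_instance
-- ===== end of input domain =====

-- B replaces A's conditional-accumulation scan by a prefix-sum table searched with bisect_left (objective:
-- alternative decomposition). Both A and B sort nums in place (nums.sort(reverse=True)); the equivalence
-- proved here is about the return value (the in-place sort side effect is identical in both).

-- ===== PORT A =====
-- A's for-loop over range(len(nums)) with state (sum, length) and early return
def pyALoop (target : Int) : Int → Int → List Int → Int
  | s, len, [] => if s < target then 0 else len
  | s, len, x :: rest =>
      if s < target then pyALoop target (s + x) (len + 1) rest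
      else if target ≤ s then len
      else pyALoop target s len rest   -- the fall-through 'continue' case of the elif chain

def minSubArrayLen_1 (target : Int) (nums : List Int) : Int :=
  pyALoop target 0 0 (PySem.List.sorted nums (fun x => x) true)

-- ===== PORT B =====
-- itertools.accumulate(nums)
def pyAccumulate : Int → List Int → List Int
  | _, [] => []
  | acc, x :: rest => (acc + x) :: pyAccumulate (acc + x) rest

-- bisect.bisect_left(pre, x, 0, hi): first index < hi whose value is ≥ x (else hi);
-- exact for a nondecreasing slice pre[0:hi], which is always the case here (the first hi
-- prefix sums come from the nonnegative elements of the descending-sorted list)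
def pyBisectLeft (pre : List Int) (x : Int) (hi : Nat) : Nat :=
  ((pre.take hi).takeWhile (fun v => decide (v < x))).length

def minSubArrayLen_1_alt (target : Int) (nums : List Int) : Int :=
  let s := PySem.List.sorted nums (fun x => x) true
  if target ≤ 0 then 0
  else
    let pre := pyAccumulate 0 s
    let p := s.countP (fun x => decide (0 ≤ x))
    let i := pyBisectLeft pre target p
    if i < p then (i : Int) + 1 else 0

-- ===== PRECONDITION & SPEC =====
def Spec_minSubArrayLen_1 (target : Int) (nums : List Int) (out : Int) : Prop := out = minSubArrayLen_1_alt target nums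
instance (target : Int) (nums : List Int) (out : Int) : Decidable (Spec_minSubArrayLen_1 target nums out) := by unfold Spec_minSubArrayLen_1; infer_instance

-- ===== CLAIM (what is proved, stated in full; the proofs are below) =====
def Claim_equal_minSubArrayLen_1 : Prop := ∀ (target : Int) (nums : List Int), Dom_minSubArrayLen_1 target nums → Spec_minSubArrayLen_1 target nums (minSubArrayLen_1 target nums)

-- ===== LEMMAS AND PROOFS =====

-- once sum ≥ target, the loop returns length immediately
theorem pyALoop_of_ge (target s len : Int) (l : List Int) (h : ¬ s < target) :
    pyALoop target s len l = len := by
  cases l with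
  | nil => simp [pyALoop, h]
  | cons x r => simp [pyALoop, h, le_of_not_gt h]

-- characterisation of A's loop while sum < target, via the accumulated prefix sums
theorem pyALoop_char (target : Int) (l : List Int) : ∀ (s len : Int), s < target →
    pyALoop target s len l =
      (if ((pyAccumulate s l).takeWhile (fun v => decide (v < target))).length < l.length
       then len + ((pyAccumulate s l).takeWhile (fun v => decide (v < target))).length + 1
       else 0) := by
  induction l with
  | nil => intro s len hs; simp [pyALoop, pyAccumulate, hs]
  | cons x r ih =>
    intro s len hs
    rw [show pyALoop target s len (x :: r) = pyALoop target (s + x) (len + 1) r from by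
      simp [pyALoop, hs]]
    rw [show pyAccumulate s (x :: r) = (s + x) :: pyAccumulate (s + x) r from rfl]
    by_cases hx : s + x < target
    · rw [ih (s + x) (len + 1) hx, List.takeWhile_cons_of_pos (by simpa using hx)]
      simp only [List.length_cons]
      split_ifs with h1 h2 h2 <;> omega
    · rw [pyALoop_of_ge target (s + x) (len + 1) r hx,
        List.takeWhile_cons_of_neg (by simpa using hx)]
      simp only [List.length_nil, List.length_cons]
      rw [if_pos (by omega)]
      omega

theorem accumulate_length (s : Int) (l : List Int) : (pyAccumulate s l).length = l.length := by
  induction l generalizing s with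
  | nil => rfl
  | cons x r ih => simp [pyAccumulate, ih]

theorem accumulate_append (s : Int) (a b : List Int) :
    pyAccumulate s (a ++ b) = pyAccumulate s a ++ pyAccumulate (a.foldl (· + ·) s) b := by
  induction a generalizing s with
  | nil => rfl
  | cons x r ih => simp [pyAccumulate, ih]

-- accumulating only negative numbers stays strictly below the start
theorem accumulate_neg_lt (b : List Int) : ∀ (s : Int), (∀ x ∈ b, x < 0) →
    ∀ v ∈ pyAccumulate s b, v < s := by
  induction b with
  | nil => intro s _ v hv; simp [pyAccumulate] at hv
  | cons x r ih =>
    intro s hneg v hv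
    have hx : x < 0 := hneg x (by simp)
    simp only [pyAccumulate, List.mem_cons] at hv
    rcases hv with h | h
    · omega
    · have := ih (s + x) (fun y hy => hneg y (by simp [hy])) v h
      omega

theorem foldl_mem_accumulate (a : List Int) : ∀ (s : Int), a ≠ [] →
    a.foldl (· + ·) s ∈ pyAccumulate s a := by
  induction a with
  | nil => intro s h; exact absurd rfl h
  | cons x r ih =>
    intro s _
    cases r with
    | nil => simp [pyAccumulate]
    | cons y t =>
      have h := ih (s + x) (by simp)
      rw [show (x :: y :: t).foldl (· + ·) s = (y :: t).foldl (· + ·) (s + x) from rfl]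
      exact List.mem_cons_of_mem _ h

-- in a descending list, everything after the nonnegative prefix is negative
theorem dropWhile_neg (l : List Int) (hp : l.Pairwise (fun a b => b ≤ a)) :
    ∀ x ∈ l.dropWhile (fun v => decide (0 ≤ v)), x < 0 := by
  induction l with
  | nil => simp
  | cons a r ih =>
    simp only [List.pairwise_cons] at hp
    by_cases ha : (0:Int) ≤ a
    · rw [List.dropWhile_cons_of_pos (by simpa using ha)]
      exact ih hp.2
    · intro x hx
      simp only [List.dropWhile_cons, ha, decide_false, Bool.false_eq_true, if_false,
        List.mem_cons] at hx
      rcases hx with rfl | hx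
      · omega
      · have := hp.1 x hx; omega

-- in a descending list countP (0 ≤ ·) is the length of the nonnegative prefix
theorem countP_eq_takeWhile (l : List Int) (hp : l.Pairwise (fun a b => b ≤ a)) :
    l.countP (fun x => decide (0 ≤ x)) = (l.takeWhile (fun v => decide (0 ≤ v))).length := by
  conv_lhs => rw [← List.takeWhile_append_dropWhile (p := fun v : Int => decide (0 ≤ v)) (l := l)]
  rw [List.countP_append]
  have h1 : (l.takeWhile (fun v => decide (0 ≤ v))).countP (fun x => decide (0 ≤ x))
      = (l.takeWhile (fun v => decide (0 ≤ v))).length := by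
    apply List.countP_eq_length.2
    intro x hx
    have := List.mem_takeWhile_imp (p := fun v : Int => decide (0 ≤ v)) hx
    simpa using this
  have h2 : (l.dropWhile (fun v => decide (0 ≤ v))).countP (fun x => decide (0 ≤ x)) = 0 := by
    apply List.countP_eq_zero.2
    intro x hx
    have := dropWhile_neg l hp x hx
    simpa using this
  omega

theorem takeWhile_length_le {p : Int → Bool} (l : List Int) :
    (l.takeWhile p).length ≤ l.length :=
  (List.takeWhile_prefix p).length_le

theorem takeWhile_take {p : Int → Bool} (l : List Int) : ∀ (n : Nat),
    (l.take n).takeWhile p = (l.takeWhile p).take n := by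
  induction l with
  | nil => intro n; simp
  | cons x r ih =>
    intro n
    cases n with
    | zero => simp
    | succ m =>
      by_cases hx : p x
      · simp [List.take_succ_cons, List.takeWhile_cons_of_pos hx, ih]
      · simp [List.take_succ_cons, List.takeWhile_cons_of_neg hx]

-- the core: on a descending list, A's scan equals B's bounded bisect formula
theorem core (target : Int) (l : List Int) (hp : l.Pairwise (fun a b => b ≤ a))
    (htpos : 0 < target) :
    pyALoop target 0 0 l =
      (let pre := pyAccumulate 0 l
       let p := l.countP (fun x => decide (0 ≤ x))
       let i := pyBisectLeft pre target p
       if i < p then (i : Int) + 1 else 0) := by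
  simp only []
  set pre := pyAccumulate 0 l with hpre
  set p := l.countP (fun x => decide (0 ≤ x)) with hP
  set i0 := (pre.takeWhile (fun v => decide (v < target))).length with hi0
  have hchar := pyALoop_char target l 0 0 htpos
  rw [← hpre, ← hi0] at hchar
  have hplen : p ≤ l.length := hP ▸ List.countP_le_length
  have hprelen : pre.length = l.length := accumulate_length 0 l
  have hi0le : i0 ≤ pre.length := hi0 ▸ takeWhile_length_le pre
  -- B's index: bisect over pre[0:p] = min i0 p
  have hbis : pyBisectLeft pre target p = min i0 p := by
    rw [pyBisectLeft, takeWhile_take pre p, List.length_take]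
    omega
  rw [hchar, hbis]
  by_cases hlt : i0 < p
  · have hmin : min i0 p = i0 := by omega
    rw [hmin, if_pos hlt, if_pos (by omega)]
    ring
  · -- p ≤ i0 : show every prefix sum is < target, hence i0 = l.length and A returns 0
    have hmin : min i0 p = p := by omega
    rw [hmin, if_neg (lt_irrefl p)]
    have hall : ∀ v ∈ pre, v < target := by
      -- split l into nonnegative prefix a and negative tail b
      set a := l.takeWhile (fun v => decide (0 ≤ v)) with ha
      set b := l.dropWhile (fun v => decide (0 ≤ v)) with hb
      have hsplit : l = a ++ b := (List.takeWhile_append_dropWhile).symm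
      have hpa : p = a.length := hP ▸ countP_eq_takeWhile l hp
      have hbneg : ∀ x ∈ b, x < 0 := dropWhile_neg l hp
      have hpreab : pre = pyAccumulate 0 a ++ pyAccumulate (a.foldl (· + ·) 0) b := by
        rw [hpre]; conv_lhs => rw [hsplit]
        exact accumulate_append 0 a b
      -- the first p entries of pre are < target (they sit inside the takeWhile (< target) prefix)
      have hfirst : ∀ v ∈ pyAccumulate 0 a, v < target := by
        intro v hv
        have hmemtake : v ∈ pre.take p := by
          rw [hpreab, hpa, List.take_append_of_le_length (by rw [accumulate_length]),
            List.take_of_length_le (by rw [accumulate_length])]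
          exact hv
        have htake : pre.take p = (pre.takeWhile (fun v => decide (v < target))).take p := by
          conv_lhs => rw [← List.takeWhile_append_dropWhile (p := fun v : Int => decide (v < target)) (l := pre)]
          rw [List.take_append_of_le_length (by omega)]
        rw [htake] at hmemtake
        have hvtw : v ∈ pre.takeWhile (fun v => decide (v < target)) := List.mem_of_mem_take hmemtake
        simpa using List.mem_takeWhile_imp hvtw
      -- the start of the negative tail is < target
      have hs2 : a.foldl (· + ·) 0 < target := by
        by_cases haem : a = []
        · simpa [haem] using htpos
        · exact hfirst _ (foldl_mem_accumulate a 0 haem)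
      intro v hv
      rw [hpreab, List.mem_append] at hv
      rcases hv with hv | hv
      · exact hfirst v hv
      · have := accumulate_neg_lt b (a.foldl (· + ·) 0) hbneg v hv
        omega
    have hi0eq : i0 = pre.length := by
      rw [hi0]
      congr 1
      exact List.takeWhile_eq_self_iff.2 (fun v hv => by simpa using hall v hv)
    rw [if_neg (by omega)]

-- ===== VERDICT (by name: the statement is the Claim_ definition above) =====
theorem minSubArrayLen_1_spec : Claim_equal_minSubArrayLen_1 := by
  intro target nums _
  unfold Spec_minSubArrayLen_1 minSubArrayLen_1 minSubArrayLen_1_alt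
  set l := PySem.List.sorted nums (fun x => x) true with hl
  have hp : l.Pairwise (fun a b => b ≤ a) := PySem.List.sorted_pairwise_rev nums (fun x => x)
  by_cases ht : target ≤ 0
  · rw [if_pos ht, pyALoop_of_ge target 0 0 l (by omega)]
  · rw [if_neg ht]
    exact core target l hp (by omega)
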